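-- pv_equiv track=rewrite | github.com/tango2026/Hangman | hangman_game.py | underscore
-- ===== SOURCE A (Python) =====
-- def underscore(phrase):
--     phrase = phrase.strip()
--     word_list = phrase.split()
--     shrowded_phrase = ""
--     for word in word_list:
--         for letter in word:
--             shrowded_phrase += '_'
--         shrowded_phrase += " "
--     shrowded_phrase = shrowded_phrase.strip()
--     return shrowded_phrase
-- ===== SOURCE B (Python) =====
-- def underscore(phrase):
--     buf = []
--     pending = False
--     for ch in phrase:
--         if ch.isspace():
--             if buf:
--                 pending = True
--         else:
--             if pending:
--                 buf.append(' ')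
--                 pending = False
--             buf.append('_')
--     return ''.join(buf)
-- ===== Notes on version B (the rewrite author's own statement) =====
-- stated objective: alternative
-- what changed: Replaced strip+split+nested loops with a single streaming pass over the characters using a pending-space flag, never building a word list and avoiding repeated string concatenation.
import Mathlib
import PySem

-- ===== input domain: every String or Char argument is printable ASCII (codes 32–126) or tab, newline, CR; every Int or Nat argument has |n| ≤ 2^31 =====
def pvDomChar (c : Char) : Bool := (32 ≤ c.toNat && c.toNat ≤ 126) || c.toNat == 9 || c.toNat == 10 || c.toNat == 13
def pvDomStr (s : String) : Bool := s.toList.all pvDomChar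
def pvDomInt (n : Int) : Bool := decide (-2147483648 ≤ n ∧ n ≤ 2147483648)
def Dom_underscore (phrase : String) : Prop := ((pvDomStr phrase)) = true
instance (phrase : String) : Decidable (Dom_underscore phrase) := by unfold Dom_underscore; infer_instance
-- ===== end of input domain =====

-- B replaces strip+split+nested loops by a single streaming pass with a pending-space flag (alternative decomposition, same result).

-- ===== PORT A =====
def underscore (phrase : String) : String :=
  let p := PySem.Chars.strip phrase.toList
  let wordList := PySem.Chars.split₀ p
  let sh := wordList.foldl
    (fun acc word => (word.foldl (fun a _ => a ++ ['_']) acc) ++ [' ']) ([] : List Char)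
  String.mk (PySem.Chars.strip sh)

-- ===== PORT B =====
def underscoreGo : List Char → List Char → Bool → List Char
  | [], buf, _ => buf
  | c :: rest, buf, pending =>
    if PySem.Chars.isspace c then
      underscoreGo rest buf (if buf.isEmpty then pending else true)
    else
      underscoreGo rest ((if pending then buf ++ [' '] else buf) ++ ['_']) false

def underscore_alt (phrase : String) : String :=
  String.mk (underscoreGo phrase.toList [] false)

-- ===== PRECONDITION & SPEC =====
def Spec_underscore (phrase : String) (out : String) : Prop := out = underscore_alt phrase
instance (phrase : String) (out : String) : Decidable (Spec_underscore phrase out) := by unfold Spec_underscore; infer_instance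

-- ===== CLAIM (what is proved, stated in full; the proofs are below) =====
def Claim_equal_underscore : Prop := ∀ (phrase : String), Dom_underscore phrase → Spec_underscore phrase (underscore phrase)

-- ===== LEMMAS AND PROOFS =====

-- accumulator-free form of PySem.Chars.split₀.go
def wordsAux : List Char → List Char → List (List Char)
  | [], cur => if cur.isEmpty then [] else [cur.reverse]
  | c :: rest, cur =>
    if PySem.Chars.isspace c then
      if cur.isEmpty then wordsAux rest [] else cur.reverse :: wordsAux rest []
    else wordsAux rest (c :: cur)

def repw (w : List Char) : List Char := List.replicate w.length '_'

-- joined underscore words (separator ' ')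
def Jw : List (List Char) → List Char
  | [] => []
  | [w] => repw w
  | w :: ws => repw w ++ ' ' :: Jw ws

theorem go_eq_wordsAux (s : List Char) : ∀ cur acc,
    PySem.Chars.split₀.go s cur acc = acc.reverse ++ wordsAux s cur := by
  induction s with
  | nil =>
    intro cur acc
    simp only [PySem.Chars.split₀.go, wordsAux]
    split_ifs <;> simp
  | cons c rest ih =>
    intro cur acc
    simp only [PySem.Chars.split₀.go, wordsAux]
    split_ifs with h1 h2
    · rw [ih]
    · rw [ih]; simp
    · rw [ih]

theorem split₀_eq_wordsAux (s : List Char) : PySem.Chars.split₀ s = wordsAux s [] := by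
  rw [show PySem.Chars.split₀ s = PySem.Chars.split₀.go s [] [] from rfl, go_eq_wordsAux]
  rfl

theorem wordsAux_allspace (t : List Char) (h : ∀ c ∈ t, PySem.Chars.isspace c) :
    ∀ cur, wordsAux t cur = if cur.isEmpty then [] else [cur.reverse] := by
  induction t with
  | nil => intro cur; rfl
  | cons c rest ih =>
    intro cur
    have hc : PySem.Chars.isspace c := h c (by simp)
    have ih' := ih (fun c hc => h c (by simp [hc]))
    simp only [wordsAux, hc, if_true]
    split_ifs with h1 <;> simp [ih']

theorem wordsAux_append_space (s t : List Char) (h : ∀ c ∈ t, PySem.Chars.isspace c) :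
    ∀ cur, wordsAux (s ++ t) cur = wordsAux s cur := by
  induction s with
  | nil =>
    intro cur
    rw [List.nil_append, wordsAux_allspace t h cur]; rfl
  | cons c rest ih =>
    intro cur
    simp only [List.cons_append, wordsAux]
    split_ifs <;> rw [ih]

theorem wordsAux_lstrip (s : List Char) :
    wordsAux (List.dropWhile PySem.Chars.isspace s) [] = wordsAux s [] := by
  induction s with
  | nil => rfl
  | cons c rest ih =>
    by_cases hc : PySem.Chars.isspace c
    · have h1 : List.dropWhile PySem.Chars.isspace (c :: rest)
          = List.dropWhile PySem.Chars.isspace rest := by simp [hc]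
      have h2 : wordsAux (c :: rest) [] = wordsAux rest [] := by simp [wordsAux, hc]
      rw [h1, ih, h2]
    · simp [hc]

theorem wordsAux_strip (s : List Char) :
    wordsAux (PySem.Chars.strip s) [] = wordsAux s [] := by
  unfold PySem.Chars.strip PySem.Chars.rstrip PySem.Chars.lstrip
  set l := List.dropWhile PySem.Chars.isspace s with hl
  have hdecomp : l = (List.dropWhile PySem.Chars.isspace l.reverse).reverse
      ++ (List.takeWhile PySem.Chars.isspace l.reverse).reverse := by
    have h := List.takeWhile_append_dropWhile (p := PySem.Chars.isspace) (l := l.reverse)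
    conv_lhs => rw [← List.reverse_reverse l, ← h]
    rw [List.reverse_append]
  have hsp : ∀ c ∈ (List.takeWhile PySem.Chars.isspace l.reverse).reverse,
      PySem.Chars.isspace c := by
    intro c hc
    exact List.mem_takeWhile_imp (List.mem_reverse.mp hc)
  calc wordsAux (List.dropWhile PySem.Chars.isspace l.reverse).reverse []
      = wordsAux ((List.dropWhile PySem.Chars.isspace l.reverse).reverse
          ++ (List.takeWhile PySem.Chars.isspace l.reverse).reverse) [] :=
        (wordsAux_append_space _ _ hsp []).symm
    _ = wordsAux l [] := by rw [← hdecomp]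
    _ = wordsAux s [] := wordsAux_lstrip s

theorem wordsAux_ne_nil_mem (s : List Char) : ∀ cur w, w ∈ wordsAux s cur → w ≠ [] := by
  induction s with
  | nil =>
    intro cur w hw
    simp only [wordsAux] at hw
    split_ifs at hw with h1
    · simp at hw
    · simp only [List.mem_singleton] at hw
      subst hw
      simpa [List.isEmpty_iff] using h1
  | cons c rest ih =>
    intro cur w hw
    simp only [wordsAux] at hw
    split_ifs at hw with h1 h2
    · exact ih [] w hw
    · rcases List.mem_cons.mp hw with h | h
      · subst h; simpa [List.isEmpty_iff] using h2
      · exact ih [] w h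
    · exact ih (c :: cur) w hw

theorem inner_fold (w : List Char) : ∀ acc,
    w.foldl (fun a _ => a ++ ['_']) acc = acc ++ repw w := by
  induction w with
  | nil => intro acc; simp [repw]
  | cons c rest ih =>
    intro acc
    rw [List.foldl_cons, ih]
    simp [repw, List.replicate_succ, List.append_assoc]

theorem outer_fold (ws : List (List Char)) : ∀ acc,
    ws.foldl (fun acc word => (word.foldl (fun a _ => a ++ ['_']) acc) ++ [' ']) acc
      = acc ++ (ws.map (fun w => repw w ++ [' '])).flatten := by
  induction ws with
  | nil => intro acc; simp
  | cons w ws ih =>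
    intro acc
    rw [List.foldl_cons, inner_fold, ih]
    simp [repw, List.append_assoc]

theorem Jw_cons (w : List Char) (ws : List (List Char)) :
    Jw (w :: ws) = repw w ++ (if ws.isEmpty then [] else ' ' :: Jw ws) := by
  cases ws <;> simp [Jw]

theorem flatten_eq_Jw (ws : List (List Char)) :
    (ws.map (fun w => repw w ++ [' '])).flatten
      = Jw ws ++ (if ws.isEmpty then [] else [' ']) := by
  induction ws with
  | nil => simp [Jw]
  | cons w ws ih =>
    simp only [List.map_cons, List.flatten_cons, ih, Jw_cons]
    cases ws <;> simp [Jw]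

theorem repw_cons_underscore (w : List Char) (h : w ≠ []) :
    ∃ t, repw w = '_' :: t := by
  cases w with
  | nil => exact absurd rfl h
  | cons c rest => exact ⟨List.replicate rest.length '_', by simp [repw, List.replicate_succ]⟩

theorem Jw_head (ws : List (List Char)) (hne : ws ≠ []) (h : ∀ w ∈ ws, w ≠ []) :
    ∃ t, Jw ws = '_' :: t := by
  cases ws with
  | nil => exact absurd rfl hne
  | cons w ws =>
    obtain ⟨t, ht⟩ := repw_cons_underscore w (h w (by simp))
    rw [Jw_cons, ht]
    exact ⟨_, rfl⟩

theorem Jw_last (ws : List (List Char)) (hne : ws ≠ []) (h : ∀ w ∈ ws, w ≠ []) :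
    ∃ t, Jw ws = t ++ ['_'] := by
  induction ws with
  | nil => exact absurd rfl hne
  | cons w ws ih =>
    cases ws with
    | nil =>
      have hw := h w (by simp)
      cases hw2 : w.reverse with
      | nil => exact absurd (by simpa using hw2) hw
      | cons c rest =>
        refine ⟨List.replicate rest.length '_', ?_⟩
        have : w.length = rest.length + 1 := by
          have := congrArg List.length hw2; simpa [Nat.add_comm] using this
        refine ?_
        simp [Jw, repw, this, List.replicate_succ']
    | cons w2 ws2 =>
      obtain ⟨t, ht⟩ := ih (by simp) (fun x hx => h x (by simp [List.mem_cons] at hx ⊢; tauto))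
      exact ⟨repw w ++ ' ' :: t, by simp [Jw, ht]⟩

theorem rstrip_append_underscore (ys : List Char) :
    PySem.Chars.rstrip (ys ++ ['_']) = ys ++ ['_'] := by
  unfold PySem.Chars.rstrip
  have : PySem.Chars.isspace '_' = false := by decide
  simp [this]

theorem strip_flatten (ws : List (List Char)) (h : ∀ w ∈ ws, w ≠ []) :
    PySem.Chars.strip ((ws.map (fun w => repw w ++ [' '])).flatten) = Jw ws := by
  cases hws : ws with
  | nil => simp [Jw, PySem.Chars.strip, PySem.Chars.rstrip, PySem.Chars.lstrip]
  | cons w ws' =>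
    rw [← hws, flatten_eq_Jw]
    have hne : ws ≠ [] := by simp [hws]
    have hif : (ws.isEmpty = true) = False := by simp [hws]
    obtain ⟨t1, ht1⟩ := Jw_head ws hne h
    obtain ⟨t2, ht2⟩ := Jw_last ws hne h
    simp only [hif, if_false]
    unfold PySem.Chars.strip
    have hl : PySem.Chars.lstrip (Jw ws ++ [' ']) = Jw ws ++ [' '] := by
      unfold PySem.Chars.lstrip
      rw [ht1]
      have : PySem.Chars.isspace '_' = false := by decide
      simp [this]
    rw [hl]
    have hr : PySem.Chars.rstrip (Jw ws ++ [' ']) = PySem.Chars.rstrip (Jw ws) := by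
      unfold PySem.Chars.rstrip
      have : PySem.Chars.isspace ' ' = true := by decide
      simp [this]
    rw [hr, ht2, rstrip_append_underscore]

theorem wordsAux_cur_ne_nil (s : List Char) : ∀ cur, cur ≠ [] → wordsAux s cur ≠ [] := by
  induction s with
  | nil => intro cur h; simp [wordsAux, List.isEmpty_iff, h]
  | cons c rest ih =>
    intro cur h
    simp only [wordsAux]
    split_ifs with h1 h2
    · exact absurd (List.isEmpty_iff.mp h2) h
    · simp
    · exact ih (c :: cur) (by simp)

theorem underscoreGo_spec (s : List Char) :
    (∀ buf, underscoreGo s buf true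
      = buf ++ (if (wordsAux s []).isEmpty then [] else ' ' :: Jw (wordsAux s []))) ∧
    (∀ cur buf, (cur = [] → buf = []) →
      underscoreGo s (buf ++ repw cur) false = buf ++ Jw (wordsAux s cur)) := by
  induction s with
  | nil =>
    constructor
    · intro buf; simp [underscoreGo, wordsAux]
    · intro cur buf hcb
      simp only [underscoreGo, wordsAux]
      by_cases hc : cur = []
      · simp [hc, hcb hc, repw, Jw]
      · simp only [List.isEmpty_iff, hc, if_false, Jw, repw]
        simp
  | cons c rest ih =>
    obtain ⟨ihT, ihF⟩ := ih
    constructor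
    · intro buf
      simp only [underscoreGo, wordsAux]
      by_cases hc : PySem.Chars.isspace c
      · simp only [hc, if_true, List.isEmpty_nil]
        rw [ite_self, ihT buf]
      · simp only [hc, if_false, Bool.false_eq_true, List.isEmpty_nil]
        simp only [if_true]
        have := ihF [c] (buf ++ [' ']) (by simp)
        have hrep : repw [c] = ['_'] := rfl
        rw [hrep] at this
        simp only [List.append_assoc] at this ⊢
        rw [this]
        have hne := wordsAux_cur_ne_nil rest [c] (by simp)
        simp [List.isEmpty_iff, hne]
    · intro cur buf hcb
      simp only [underscoreGo, wordsAux]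
      by_cases hc : PySem.Chars.isspace c
      · simp only [hc, if_true]
        by_cases hcur : cur = []
        · have hbuf := hcb hcur
          subst hcur; subst hbuf
          simpa [repw] using ihF [] [] (fun _ => rfl)
        · have hbufrep : (buf ++ repw cur).isEmpty = false := by
            obtain ⟨t, ht⟩ := repw_cons_underscore cur hcur
            simp [ht]
          simp only [hbufrep, Bool.false_eq_true, if_false]
          rw [ihT (buf ++ repw cur)]
          simp only [List.isEmpty_iff, hcur, if_false]
          have hJ : Jw (cur.reverse :: wordsAux rest [])
              = repw cur.reverse ++ (if (wordsAux rest []).isEmpty then [] else ' ' :: Jw (wordsAux rest [])) := Jw_cons _ _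
          have hrev : repw cur.reverse = repw cur := by simp [repw]
          rw [hJ, hrev]
          split_ifs <;> simp_all [List.isEmpty_iff]
      · simp only [hc, Bool.false_eq_true, if_false]
        have hstep : buf ++ repw cur ++ ['_'] = buf ++ repw (c :: cur) := by
          have : repw (c :: cur) = repw cur ++ ['_'] := by
            simp only [repw, List.length_cons, List.replicate_succ']
          simp [this]
        rw [hstep, ihF (c :: cur) buf (by simp)]

-- ===== VERDICT (by name: the statement is the Claim_ definition above) =====
theorem underscore_spec : Claim_equal_underscore := by
  intro phrase _
  unfold Spec_underscore underscore underscore_alt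
  simp only [split₀_eq_wordsAux, wordsAux_strip, outer_fold, List.nil_append]
  rw [strip_flatten _ (wordsAux_ne_nil_mem phrase.toList [])]
  have h2 := (underscoreGo_spec phrase.toList).2 [] [] (fun _ => rfl)
  simp only [repw, List.length_nil, List.replicate_zero, List.append_nil, List.nil_append] at h2
  rw [h2]
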